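-- pv_equiv track=rewrite | github.com/srishtianand517-bot/leetcode-solutions | python-codes/longest-palindrome-substring-concat.py | longestPalindromeConcat
-- ===== SOURCE A (Python) =====
-- def longestPalindromeConcat(s, t):
--     max_len = 0
--
--     # Single characters are palindromes
--     max_len = max(len(s), len(t), 1)
--
--     # Check all combinations of suffix of s + prefix of t
--     for i in range(len(s)+1):
--         for j in range(len(t)+1):
--             combined = s[i:] + t[:j]
--             if combined == combined[::-1]:
--                 max_len = max(max_len, len(combined))
--
--     return max_len
-- ===== SOURCE B (Python) =====
-- def longestPalindromeConcat(s, t):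
--     # Different algorithm: decompose each candidate s[i:] + t[:j] into a mirrored
--     # cross part plus a palindromic core that lies wholly in s or wholly in t.
--     # A DP table of match-run lengths and two precomputed palindrome tables make
--     # each (i, j) test O(1) instead of building and reversing the candidate.
--     n, m = len(s), len(t)
--     # palS[i] <-> s[i:] is a palindrome ; palT[j] <-> t[:j] is a palindrome
--     palS = [s[i:] == s[i:][::-1] for i in range(n + 1)]
--     palT = [t[:j] == t[:j][::-1] for j in range(m + 1)]
--     # rows[i][j] = length of the initial run of matches s[i+p] == t[j-1-p]
--     row = [0] * (m + 1)
--     rows = [row]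
--     for ch in reversed(s):
--         row = [0] + [v + 1 if ch == tc else 0 for tc, v in zip(t, row)]
--         rows.append(row)
--     rows.reverse()
--     best = max(n, m, 1)
--     for i in range(n + 1):
--         a = n - i
--         for j in range(m + 1):
--             if rows[i][j] >= min(a, j) and (palS[i + j] if a >= j else palT[j - a]):
--                 best = max(best, a + j)
--     return best
-- ===== Notes on version B (the rewrite author's own statement) =====
-- stated objective: faster
-- what changed: B decomposes each candidate s[i:]+t[:j] into a mirrored cross part plus a palindromic core inside one string: a DP table of cross match-run lengths and two precomputed palindromic-suffix/prefix tables make each (i,j) test O(1), instead of building and reversing every concatenation.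
import Mathlib
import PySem

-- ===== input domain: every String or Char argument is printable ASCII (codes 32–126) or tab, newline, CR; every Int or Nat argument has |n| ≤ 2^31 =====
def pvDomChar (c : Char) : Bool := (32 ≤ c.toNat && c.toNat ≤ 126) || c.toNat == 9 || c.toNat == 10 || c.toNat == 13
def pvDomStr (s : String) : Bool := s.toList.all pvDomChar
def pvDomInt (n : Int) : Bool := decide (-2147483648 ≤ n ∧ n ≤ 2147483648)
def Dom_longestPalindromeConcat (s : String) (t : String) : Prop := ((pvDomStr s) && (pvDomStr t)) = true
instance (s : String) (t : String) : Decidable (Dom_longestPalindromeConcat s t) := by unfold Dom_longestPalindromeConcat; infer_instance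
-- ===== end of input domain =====

-- B replaces A's build-and-reverse test of every concatenation by a decomposition into a
-- mirrored cross part (a DP table of match-run lengths) plus a palindromic core looked up
-- in two precomputed tables; same return value, asymptotically faster.

-- ===== PORT A =====
-- A, step for step, on the code-point lists (PySem string ops are defined on List Char).
def pvPalA (cs ts : List Char) : Int :=
  -- max_len = max(len(s), len(t), 1)
  let maxLen : Int := max (max ((cs.length : Int)) ((ts.length : Int))) 1
  -- for i in range(len(s)+1): for j in range(len(t)+1): …
  (PySem.List.pyRange 0 ((cs.length : Int) + 1) 1).foldl (fun acc i =>
    (PySem.List.pyRange 0 ((ts.length : Int) + 1) 1).foldl (fun acc j =>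
      let combined := PySem.List.slice cs (some i) none ++ PySem.List.slice ts none (some j)
      -- if combined == combined[::-1]: max_len = max(max_len, len(combined))
      if some combined = PySem.List.slice? combined none none (-1) then
        max acc ((combined.length : Int))
      else acc) acc) maxLen

def longestPalindromeConcat (s : String) (t : String) : Int :=
  pvPalA s.toList t.toList

-- ===== PORT B =====
-- row = [0] + [v + 1 if ch == tc else 0 for tc, v in zip(t, row)]
def pvRowB (c : Char) (ts : List Char) (prev : List Int) : List Int :=
  0 :: List.zipWith (fun tc v => if c = tc then v + 1 else (0 : Int)) ts prev

-- the rows list: Python builds it bottom-up over reversed(s) and reverses it; here the same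
-- list is built by structural recursion (rows for c :: rest = new row from rest's head, then rest's rows)
def pvRowsB (ts : List Char) (m : Nat) : List Char → List (List Int)
  | [] => [List.replicate (m + 1) 0]
  | c :: rest => pvRowB c ts ((pvRowsB ts m rest).headD []) :: pvRowsB ts m rest

-- B: palindromic suffix/prefix tables + DP match-run table, then an O(1) test per (i, j).
-- (x == x[::-1] on a whole string is exactly 'the list equals its reverse'.)
def pvPalB (cs ts : List Char) : Int :=
  let n : Int := cs.length
  let m : Int := ts.length
  let palS := (PySem.List.pyRange 0 (n + 1) 1).map (fun i =>
      let u := PySem.List.slice cs (some i) none; u == u.reverse)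
  let palT := (PySem.List.pyRange 0 (m + 1) 1).map (fun j =>
      let u := PySem.List.slice ts none (some j); u == u.reverse)
  let rows := pvRowsB ts ts.length cs
  (PySem.List.pyRange 0 (n + 1) 1).foldl (fun best i =>
    let a := n - i
    (PySem.List.pyRange 0 (m + 1) 1).foldl (fun best j =>
      if min a j ≤ PySem.List.pyGetD (PySem.List.pyGetD rows i []) j 0
          ∧ (if j ≤ a then PySem.List.pyGetD palS (i + j) false
             else PySem.List.pyGetD palT (j - a) false) = true
      then max best (a + j) else best) best) (max (max n m) 1)

def longestPalindromeConcat_alt (s : String) (t : String) : Int :=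
  pvPalB s.toList t.toList

-- ===== PRECONDITION & SPEC =====
def Spec_longestPalindromeConcat (s : String) (t : String) (out : Int) : Prop := out = longestPalindromeConcat_alt s t
instance (s : String) (t : String) (out : Int) : Decidable (Spec_longestPalindromeConcat s t out) := by unfold Spec_longestPalindromeConcat; infer_instance

-- ===== CLAIM (what is proved, stated in full; the proofs are below) =====
def Claim_equal_longestPalindromeConcat : Prop := ∀ (s : String) (t : String), Dom_longestPalindromeConcat s t → Spec_longestPalindromeConcat s t (longestPalindromeConcat s t)

-- ===== LEMMAS AND PROOFS =====

-- a list is its own reverse iff the first half mirrors the second half (by getD)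
lemma pal_iff_half (l : List Char) :
    (l = l.reverse) ↔
      (∀ k : Nat, k < l.length / 2 → l.getD k ' ' = l.getD (l.length - 1 - k) ' ') := by
  constructor
  · intro h k hk
    have h1 : k < l.length := by omega
    have e : l[k]? = l[l.length - 1 - k]? := by
      conv_lhs => rw [h]
      exact List.getElem?_reverse h1
    simp [List.getD_eq_getElem?_getD, e]
  · intro h
    have h' : ∀ k : Nat, k < l.length / 2 → l[k]? = l[l.length - 1 - k]? := by
      intro k hk
      have e := h k hk
      rw [List.getD_eq_getElem?_getD, List.getD_eq_getElem?_getD,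
          List.getElem?_eq_getElem (show k < l.length by omega),
          List.getElem?_eq_getElem (show l.length - 1 - k < l.length by omega)] at e
      rw [List.getElem?_eq_getElem (show k < l.length by omega),
          List.getElem?_eq_getElem (show l.length - 1 - k < l.length by omega)]
      simpa using e
    apply List.ext_getElem?
    intro k
    by_cases h1 : k < l.length
    · rw [List.getElem?_reverse h1]
      by_cases hk : k < l.length / 2
      · exact h' k hk
      · by_cases hk2 : l.length - 1 - k < l.length / 2
        · have e := (h' _ hk2).symm
          have hx : l.length - 1 - (l.length - 1 - k) = k := by omega
          rwa [hx] at e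
        · have hx : l.length - 1 - k = k := by omega
          rw [hx]
    · rw [List.getElem?_eq_none (by omega), List.getElem?_eq_none (by simp; omega)]

-- spec of one DP-table entry: length of the initial run of matches cs'[p] == ts[j-1-p]
def pvMrun (ts : List Char) : List Char → Nat → Int
  | [], _ => 0
  | _ :: _, 0 => 0
  | c :: rest, (j + 1) => if c = ts.getD j ' ' then pvMrun ts rest j + 1 else 0

-- the row pvRowsB stores at index i, as a recursion on the suffix
def pvRowFor (ts : List Char) (m : Nat) : List Char → List Int
  | [] => List.replicate (m + 1) 0
  | c :: rest => pvRowB c ts (pvRowFor ts m rest)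

lemma rowsB_headD (ts : List Char) (m : Nat) (cs : List Char) :
    (pvRowsB ts m cs).headD [] = pvRowFor ts m cs := by
  induction cs with
  | nil => rfl
  | cons c rest ih =>
    rw [pvRowsB, pvRowFor, List.headD_cons, ih]

lemma rowsB_getD (ts : List Char) (m : Nat) (cs : List Char) (i : Nat) (hi : i ≤ cs.length) :
    (pvRowsB ts m cs).getD i [] = pvRowFor ts m (cs.drop i) := by
  induction cs generalizing i with
  | nil =>
    have : i = 0 := by simpa using hi
    simp [this, pvRowsB, pvRowFor]
  | cons c rest ih =>
    cases i with
    | zero =>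
      rw [pvRowsB, List.getD_cons_zero, rowsB_headD ts m rest, List.drop_zero, pvRowFor]
    | succ i' => simpa [pvRowsB] using ih i' (by simpa using hi)

lemma rowFor_length (ts : List Char) (m : Nat) (hm : ts.length = m) (cs' : List Char) :
    (pvRowFor ts m cs').length = m + 1 := by
  induction cs' with
  | nil => simp [pvRowFor]
  | cons c rest ih => simp [pvRowFor, pvRowB, ih, hm]

lemma rowFor_getD (ts : List Char) (m : Nat) (hm : ts.length = m) (cs' : List Char)
    (j : Nat) (hj : j ≤ m) :
    (pvRowFor ts m cs').getD j 0 = pvMrun ts cs' j := by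
  induction cs' generalizing j with
  | nil =>
    rw [pvRowFor, pvMrun, List.getD_eq_getElem _ _ (by simp; omega)]
    simp
  | cons c rest ih =>
    cases j with
    | zero => simp [pvRowFor, pvRowB, pvMrun]
    | succ j' =>
      have hlen : (List.zipWith (fun tc v => if c = tc then v + 1 else (0 : Int)) ts
          (pvRowFor ts m rest)).length = m := by
        simp [rowFor_length ts m hm, hm]
      have hj' : j' < m := by omega
      rw [pvRowFor, pvRowB, pvMrun]
      have : (((0 : Int)) :: List.zipWith (fun tc v => if c = tc then v + 1 else (0 : Int)) ts
          (pvRowFor ts m rest)).getD (j' + 1) 0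
          = (List.zipWith (fun tc v => if c = tc then v + 1 else (0 : Int)) ts
          (pvRowFor ts m rest)).getD j' 0 := by
        simp
      rw [this, List.getD_eq_getElem _ _ (by omega), List.getElem_zipWith]
      have h1 : ts[j']'(by omega) = ts.getD j' ' ' := by
        rw [List.getD_eq_getElem _ _ (by omega)]
      have h2 : (pvRowFor ts m rest)[j']'(by rw [rowFor_length ts m hm]; omega)
          = (pvRowFor ts m rest).getD j' 0 := by
        rw [List.getD_eq_getElem _ _ (by rw [rowFor_length ts m hm]; omega)]
      rw [h1, h2, ih j' (by omega)]

lemma rowsB_length (ts : List Char) (m : Nat) (cs : List Char) :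
    (pvRowsB ts m cs).length = cs.length + 1 := by
  induction cs with
  | nil => rfl
  | cons c rest ih => simp [pvRowsB, ih]

-- the DP entry reaches c = min(len cs', j) iff every cross pair matches
lemma mrun_iff (ts : List Char) (cs' : List Char) (j : Nat) :
    ((min cs'.length j : Nat) : Int) ≤ pvMrun ts cs' j ↔
      ∀ p < min cs'.length j, cs'.getD p ' ' = ts.getD (j - 1 - p) ' ' := by
  induction cs' generalizing j with
  | nil => simp [pvMrun]
  | cons c rest ih =>
    cases j with
    | zero => simp [pvMrun]
    | succ j' =>
      rw [pvMrun]
      have hmin : min (c :: rest).length (j' + 1) = min rest.length j' + 1 := by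
        simp [List.length_cons]
      by_cases h : c = ts.getD j' ' '
      · rw [if_pos h, hmin]
        have step : (((min rest.length j' + 1 : Nat)) : Int) ≤ pvMrun ts rest j' + 1 ↔
            ((min rest.length j' : Nat) : Int) ≤ pvMrun ts rest j' := by
          push_cast; omega
        rw [step, ih j']
        constructor
        · intro hall p hp
          cases p with
          | zero => simpa using h
          | succ q =>
            have h1 : rest.getD q ' ' = ts.getD (j' - 1 - q) ' ' := hall q (by omega)
            have h2 : j' + 1 - 1 - (q + 1) = j' - 1 - q := by omega
            rw [List.getD_cons_succ, h2]
            exact h1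
        · intro hall q hq
          have h1 := hall (q + 1) (by omega)
          have h2 : j' + 1 - 1 - (q + 1) = j' - 1 - q := by omega
          rw [List.getD_cons_succ, h2] at h1
          exact h1
      · rw [if_neg h, hmin]
        constructor
        · intro habs
          exfalso
          have : ((min rest.length j' + 1 : Nat) : Int) ≤ 0 := habs
          push_cast at this; omega
        · intro hall
          exfalso
          exact h (by simpa using hall 0 (by omega))

-- character k of (cs.drop i' ++ ts.take j') by index arithmetic into cs and ts
lemma getD_combined (cs ts : List Char) (i' j' k : Nat)
    (hi : i' ≤ cs.length) (hj : j' ≤ ts.length) (hk : k < (cs.length - i') + j') :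
    (cs.drop i' ++ ts.take j').getD k ' ' =
      if k < cs.length - i' then cs.getD (i' + k) ' ' else ts.getD (k - (cs.length - i')) ' ' := by
  have hdl : (cs.drop i').length = cs.length - i' := by simp
  have htl : (ts.take j').length = j' := by simp; omega
  by_cases hka : k < cs.length - i'
  · rw [if_pos hka, List.getD_eq_getElem _ _ (by simp [List.length_append]; omega),
        List.getElem_append_left (by omega), List.getElem_drop,
        List.getD_eq_getElem _ _ (by omega)]
  · rw [if_neg hka, List.getD_eq_getElem _ _ (by simp [List.length_append]; omega),
        List.getElem_append_right (by omega)]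
    rw [List.getElem_take, List.getD_eq_getElem _ _ (by omega)]
    congr 1
    omega

-- drop's getD in terms of the original list
lemma getD_drop' (cs : List Char) (i' p : Nat) (hp : p < cs.length - i') :
    (cs.drop i').getD p ' ' = cs.getD (i' + p) ' ' := by
  rw [List.getD_eq_getElem _ _ (by simp; omega), List.getElem_drop,
      List.getD_eq_getElem _ _ (by omega)]

-- take's getD in terms of the original list
lemma getD_take' (ts : List Char) (j' q : Nat) (hq : q < j') (hj : j' ≤ ts.length) :
    (ts.take j').getD q ' ' = ts.getD q ' ' := by
  rw [List.getD_eq_getElem _ _ (by simp; omega), List.getElem_take,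
      List.getD_eq_getElem _ _ (by omega)]

-- THE decomposition: suffix+prefix is a palindrome iff the cross run reaches min(a, j')
-- and the leftover core (inside s if j' ≤ a, inside t otherwise) is a palindrome
lemma cond_iff (cs ts : List Char) (i' j' : Nat) (hi : i' ≤ cs.length) (hj : j' ≤ ts.length) :
    (cs.drop i' ++ ts.take j' = (cs.drop i' ++ ts.take j').reverse) ↔
      (((min (cs.length - i') j' : Nat) : Int) ≤ pvMrun ts (cs.drop i') j' ∧
        (if j' ≤ cs.length - i' then cs.drop (i' + j') = (cs.drop (i' + j')).reverse
         else ts.take (j' - (cs.length - i')) = (ts.take (j' - (cs.length - i'))).reverse)) := by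
  set a := cs.length - i' with ha
  have hlen : (cs.drop i' ++ ts.take j').length = a + j' := by
    simp [List.length_append]; omega
  have hminlen : min (cs.drop i').length j' = min a j' := by simp [ha]
  rw [pal_iff_half, hlen, ← hminlen, mrun_iff, hminlen]
  constructor
  · intro hall
    refine ⟨?_, ?_⟩
    · -- cross pairs
      intro p hp
      have hpa : p < a := by omega
      have hpj : p < j' := by omega
      have hhalf : p < (a + j') / 2 := by omega
      have := hall p hhalf
      rw [getD_combined cs ts i' j' p hi hj (by omega),
          getD_combined cs ts i' j' (a + j' - 1 - p) hi hj (by omega)] at this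
      rw [if_pos hpa, if_neg (by omega)] at this
      have hidx : a + j' - 1 - p - a = j' - 1 - p := by omega
      rw [hidx] at this
      rw [getD_drop' cs i' p (by omega), this]
    · -- the core
      by_cases hcase : j' ≤ a
      · rw [if_pos hcase, pal_iff_half]
        intro q hq
        have hql : (cs.drop (i' + j')).length = a - j' := by simp [ha]; omega
        rw [hql] at hq
        have hk : j' + q < (a + j') / 2 := by omega
        have := hall (j' + q) hk
        rw [getD_combined cs ts i' j' (j' + q) hi hj (by omega),
            getD_combined cs ts i' j' (a + j' - 1 - (j' + q)) hi hj (by omega)] at this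
        rw [if_pos (by omega), if_pos (by omega)] at this
        rw [hql, getD_drop' cs (i' + j') q (by omega),
            getD_drop' cs (i' + j') (a - j' - 1 - q) (by omega)]
        have e1 : i' + (j' + q) = i' + j' + q := by omega
        have e2 : i' + (a + j' - 1 - (j' + q)) = i' + j' + (a - j' - 1 - q) := by omega
        rw [e1, e2] at this
        exact this
      · rw [if_neg hcase, pal_iff_half]
        intro q hq
        have htl : (ts.take (j' - a)).length = j' - a := by simp; omega
        rw [htl] at hq
        have hk : a + q < (a + j') / 2 := by omega
        have := hall (a + q) hk
        rw [getD_combined cs ts i' j' (a + q) hi hj (by omega),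
            getD_combined cs ts i' j' (a + j' - 1 - (a + q)) hi hj (by omega)] at this
        rw [if_neg (by omega), if_neg (by omega)] at this
        rw [htl, getD_take' ts (j' - a) q (by omega) (by omega),
            getD_take' ts (j' - a) (j' - a - 1 - q) (by omega) (by omega)]
        have e1 : a + q - a = q := by omega
        have e2 : a + j' - 1 - (a + q) - a = j' - a - 1 - q := by omega
        rw [e1, e2] at this
        exact this
  · rintro ⟨hcross, hcore⟩ k hk
    rw [getD_combined cs ts i' j' k hi hj (by omega),
        getD_combined cs ts i' j' (a + j' - 1 - k) hi hj (by omega)]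
    by_cases hkc : k < min a j'
    · -- cross zone
      rw [if_pos (by omega), if_neg (by omega)]
      have := hcross k hkc
      rw [getD_drop' cs i' k (by omega)] at this
      have hidx : a + j' - 1 - k - a = j' - 1 - k := by omega
      rw [hidx]
      exact this
    · by_cases hcase : j' ≤ a
      · -- core inside s
        rw [if_pos hcase, pal_iff_half] at hcore
        have hql : (cs.drop (i' + j')).length = a - j' := by simp [ha]; omega
        have hkj : j' ≤ k := by omega
        have := hcore (k - j') (by rw [hql]; omega)
        rw [hql, getD_drop' cs (i' + j') (k - j') (by omega),
            getD_drop' cs (i' + j') (a - j' - 1 - (k - j')) (by omega)] at this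
        rw [if_pos (by omega), if_pos (by omega)]
        have e1 : i' + k = i' + j' + (k - j') := by omega
        have e2 : i' + (a + j' - 1 - k) = i' + j' + (a - j' - 1 - (k - j')) := by omega
        rw [e1, e2]
        exact this
      · -- core inside t
        rw [if_neg hcase, pal_iff_half] at hcore
        have htl : (ts.take (j' - a)).length = j' - a := by simp; omega
        have hka : a ≤ k := by omega
        have := hcore (k - a) (by rw [htl]; omega)
        rw [htl, getD_take' ts (j' - a) (k - a) (by omega) (by omega),
            getD_take' ts (j' - a) (j' - a - 1 - (k - a)) (by omega) (by omega)] at this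
        rw [if_neg (by omega), if_neg (by omega)]
        have e1 : k - a = k - a := rfl
        have e2 : a + j' - 1 - k - a = j' - a - 1 - (k - a) := by omega
        rw [e2]
        exact this

-- the two inner-loop bodies agree for every in-range (i, j) and accumulator
lemma step_eq (cs ts : List Char) (i j acc : Int)
    (hi0 : 0 ≤ i) (hi : i ≤ (cs.length : Int)) (hj0 : 0 ≤ j) (hj : j ≤ (ts.length : Int)) :
    (let combined := PySem.List.slice cs (some i) none ++ PySem.List.slice ts none (some j)
     if some combined = PySem.List.slice? combined none none (-1) then
       max acc ((combined.length : Int)) else acc)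
    = (let a := (cs.length : Int) - i
       if min a j ≤ PySem.List.pyGetD
            (PySem.List.pyGetD (pvRowsB ts ts.length cs) i []) j 0
          ∧ (if j ≤ a then
               PySem.List.pyGetD ((PySem.List.pyRange 0 ((cs.length : Int) + 1) 1).map (fun i =>
                 let u := PySem.List.slice cs (some i) none; u == u.reverse)) (i + j) false
             else
               PySem.List.pyGetD ((PySem.List.pyRange 0 ((ts.length : Int) + 1) 1).map (fun j =>
                 let u := PySem.List.slice ts none (some j); u == u.reverse)) (j - a) false) = true
       then max acc (a + j) else acc) := by
  simp only []
  rw [PySem.List.slice_from cs hi0, PySem.List.slice_to ts hj0, PySem.List.slice?_none_none_neg_one]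
  set i' := i.toNat with hi'
  set j' := j.toNat with hj'
  have hi'le : i' ≤ cs.length := by omega
  have hj'le : j' ≤ ts.length := by omega
  -- the B-side DP lookup is the mrun spec
  have hrows : PySem.List.pyGetD (PySem.List.pyGetD (pvRowsB ts ts.length cs) i []) j 0
      = pvMrun ts (cs.drop i') j' := by
    rw [PySem.List.pyGetD_eq_getElem _ _ hi0 (by rw [rowsB_length]; push_cast; omega)]
    have h1 : (pvRowsB ts ts.length cs)[i.toNat]'(by rw [rowsB_length]; omega)
        = (pvRowsB ts ts.length cs).getD i.toNat [] := by
      rw [List.getD_eq_getElem _ _ (by rw [rowsB_length]; omega)]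
    rw [h1, rowsB_getD ts ts.length cs i' hi'le]
    rw [PySem.List.pyGetD_eq_getElem _ _ hj0
        (by rw [rowFor_length ts ts.length rfl]; push_cast; omega)]
    have h2 : (pvRowFor ts ts.length (cs.drop i'))[j.toNat]'(by
        rw [rowFor_length ts ts.length rfl]; omega)
        = (pvRowFor ts ts.length (cs.drop i')).getD j.toNat 0 := by
      rw [List.getD_eq_getElem _ _ (by rw [rowFor_length ts ts.length rfl]; omega)]
    rw [h2, rowFor_getD ts ts.length rfl (cs.drop i') j' (by omega)]
  have hmin : min ((cs.length : Int) - i) j = ((min (cs.length - i') j' : Nat) : Int) := by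
    push_cast; omega
  -- the B-side table lookups are the core-palindrome conditions
  have hbool : ((if j ≤ (cs.length : Int) - i then
        PySem.List.pyGetD ((PySem.List.pyRange 0 ((cs.length : Int) + 1) 1).map (fun i =>
          let u := PySem.List.slice cs (some i) none; u == u.reverse)) (i + j) false
      else
        PySem.List.pyGetD ((PySem.List.pyRange 0 ((ts.length : Int) + 1) 1).map (fun j =>
          let u := PySem.List.slice ts none (some j); u == u.reverse))
          (j - ((cs.length : Int) - i)) false) = true) ↔
      (if j' ≤ cs.length - i' then cs.drop (i' + j') = (cs.drop (i' + j')).reverse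
       else ts.take (j' - (cs.length - i')) = (ts.take (j' - (cs.length - i'))).reverse) := by
    by_cases hcase : j' ≤ cs.length - i'
    · rw [if_pos (show j ≤ (cs.length : Int) - i by omega), if_pos hcase]
      rw [PySem.List.pyGetD_map_pyRange_of_nonneg _ _ _ _ (by omega) (by omega)]
      simp only []
      rw [PySem.List.slice_from cs (by omega)]
      have h3 : (i + j).toNat = i' + j' := by omega
      rw [h3, beq_iff_eq]
    · rw [if_neg (show ¬ j ≤ (cs.length : Int) - i by omega), if_neg hcase]
      rw [PySem.List.pyGetD_map_pyRange_of_nonneg _ _ _ _ (by omega) (by omega)]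
      simp only []
      rw [PySem.List.slice_to ts (by omega)]
      have h3 : (j - ((cs.length : Int) - i)).toNat = j' - (cs.length - i') := by omega
      rw [h3, beq_iff_eq]
  have hBiff : (cs.drop i' ++ ts.take j' = (cs.drop i' ++ ts.take j').reverse) ↔
      (min ((cs.length : Int) - i) j ≤ PySem.List.pyGetD
          (PySem.List.pyGetD (pvRowsB ts ts.length cs) i []) j 0
        ∧ (if j ≤ (cs.length : Int) - i then
             PySem.List.pyGetD ((PySem.List.pyRange 0 ((cs.length : Int) + 1) 1).map (fun i =>
               let u := PySem.List.slice cs (some i) none; u == u.reverse)) (i + j) false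
           else
             PySem.List.pyGetD ((PySem.List.pyRange 0 ((ts.length : Int) + 1) 1).map (fun j =>
               let u := PySem.List.slice ts none (some j); u == u.reverse))
               (j - ((cs.length : Int) - i)) false) = true) := by
    rw [hrows, hmin]
    exact (cond_iff cs ts i' j' hi'le hj'le).trans (and_congr Iff.rfl hbool.symm)
  have hL : ((cs.drop i' ++ ts.take j').length : Int) = ((cs.length : Int) - i) + j := by
    simp [List.length_append]; omega
  rw [hL]
  exact if_congr ((Option.some_inj).trans hBiff) rfl rfl

-- ===== VERDICT (by name: the statement is the Claim_ definition above) =====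
theorem longestPalindromeConcat_spec : Claim_equal_longestPalindromeConcat := by
  intro s t _
  unfold Spec_longestPalindromeConcat longestPalindromeConcat longestPalindromeConcat_alt
  unfold pvPalA pvPalB
  simp only []
  apply PySem.List.foldl_congr_mem
  intro acc i hi
  rw [PySem.List.mem_pyRange_one] at hi
  apply PySem.List.foldl_congr_mem
  intro acc' j hj
  rw [PySem.List.mem_pyRange_one] at hj
  exact step_eq s.toList t.toList i j acc' hi.1 (by omega) hj.1 (by omega)
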